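-- pv_equiv track=rewrite | github.com/naqushab/ScalerAcademy | Scaler/Advanced/Queue - I/Perfect Numbers.py | solve
-- ===== SOURCE A (Python) =====
-- import collections
--
-- def solve(A):
--     q = collections.deque()
--     q.append('11')
--     q.append('22')
--     count = 0
--     while q:
--         d = q.popleft()
--         count += 1
--         if count == A:
--             return d
--         l = len(d)
--         q.append(d[:l//2] + '11' + d[l//2:])
--         q.append(d[:l//2] + '22' + d[l//2:])
-- ===== SOURCE B (Python) =====
-- def solve(A):
--     # Nth (1-based) palindrome over digits 1/2 in BFS order: the binary digits
--     # of A+1 below its top bit, mapped 0->'1'/1->'2', form the left half.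
--     bits = []
--     n = A + 1
--     while n > 1:
--         bits.append('2' if n % 2 == 1 else '1')
--         n //= 2
--     left = ''.join(reversed(bits))
--     return left + ''.join(bits)
-- ===== Notes on version B (the rewrite author's own statement) =====
-- stated objective: faster
-- what changed: Replaces the BFS queue enumeration of all A palindromes by a closed form: the binary digits of A+1 below the top bit, mapped 0->'1'/1->'2', are the left half of the answer, which is then mirrored.
-- outside the precondition, e.g. on solve(0): A does not finish within the time limit, B returns ''
import Mathlib
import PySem

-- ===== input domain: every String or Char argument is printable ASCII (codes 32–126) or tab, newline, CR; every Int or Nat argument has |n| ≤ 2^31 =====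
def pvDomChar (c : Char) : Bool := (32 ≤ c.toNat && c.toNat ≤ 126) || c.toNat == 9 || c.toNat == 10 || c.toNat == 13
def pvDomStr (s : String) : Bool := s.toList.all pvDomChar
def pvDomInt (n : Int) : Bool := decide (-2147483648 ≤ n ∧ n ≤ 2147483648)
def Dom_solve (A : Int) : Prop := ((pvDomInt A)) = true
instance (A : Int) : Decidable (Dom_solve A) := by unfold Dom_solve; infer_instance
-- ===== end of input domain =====

-- B replaces A's breadth-first queue enumeration (O(A log A)) by a closed form O(log A):
-- the binary digits of A+1 below the top bit, mapped 0->'1'/1->'2', are the left half of the answer.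

-- ===== PORT A =====
-- BFS loop; fuel = number of remaining iterations possible (the loop returns at iteration
-- count = A, so A.toNat fuel suffices; the 0-fuel and empty-queue branches are unreachable
-- under Pre_solve — the queue never empties and for A ≤ 0 Python's loop never terminates).
def solveLoop : Nat → List String → Int → Int → String
  | 0, _, _, _ => ""
  | _ + 1, [], _, _ => ""
  | f + 1, d :: rest, count, A =>
      let count := count + 1
      if count = A then d
      else
        let dl := d.toList
        let l : Int := PySem.Chars.len dl
        let h := PySem.Int.floordiv l 2
        let pre := PySem.Chars.slice dl none (some h)      -- d[:l//2]
        let suf := PySem.Chars.slice dl (some h) none      -- d[l//2:]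
        solveLoop f (rest ++ [String.ofList (pre ++ ['1', '1'] ++ suf),
                              String.ofList (pre ++ ['2', '2'] ++ suf)]) count A

def solve (A : Int) : String := solveLoop A.toNat ["11", "22"] 0 A

-- ===== PORT B =====
-- 'while n > 1: bits.append('2' if n % 2 == 1 else '1'); n //= 2'
def altBits (n : Int) : List Char :=
  if 1 < n then
    (if PySem.Int.mod n 2 = 1 then '2' else '1') :: altBits (PySem.Int.floordiv n 2)
  else []
termination_by n.toNat
decreasing_by
  simp only [PySem.Int.floordiv_eq_ediv_of_pos (by omega : (0:Int) < 2)]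
  omega

def solve_alt (A : Int) : String :=
  let bits := altBits (A + 1)
  String.ofList (bits.reverse ++ bits)   -- ''.join(reversed(bits)) + ''.join(bits)

-- ===== PRECONDITION & SPEC =====
-- For A ≤ 0 the Python loop never terminates (count never reaches A): excluded.
def Pre_solve (A : Int) : Prop := 1 ≤ A
instance (A : Int) : Decidable (Pre_solve A) := by unfold Pre_solve; infer_instance
def pvWitness_solve : Int := 5

def Spec_solve (A : Int) (out : String) : Prop := out = solve_alt A
instance (A : Int) (out : String) : Decidable (Spec_solve A out) := by unfold Spec_solve; infer_instance

-- ===== CLAIM (what is proved, stated in full; the proofs are below) =====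
def Claim_equal_solve : Prop := ∀ (A : Int), Dom_solve A → Pre_solve A → Spec_solve A (solve A)

-- ===== LEMMAS AND PROOFS =====

-- the value B returns for index n (1-based BFS index)
def sStr (n : Int) : String := String.ofList ((altBits (n + 1)).reverse ++ altBits (n + 1))

lemma altBits_double {n : Int} (hn : 2 ≤ n) : altBits (2 * n) = '1' :: altBits n := by
  rw [altBits]
  have h1 : (1:Int) < 2 * n := by omega
  have hm : PySem.Int.mod (2 * n) 2 = 0 := by
    rw [PySem.Int.mod_eq_emod_of_pos (by omega)]; omega
  have hd : PySem.Int.floordiv (2 * n) 2 = n := by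
    rw [PySem.Int.floordiv_eq_ediv_of_pos (by omega)]; omega
  rw [if_pos h1, hm, hd]; norm_num

lemma altBits_double_succ {n : Int} (hn : 2 ≤ n) :
    altBits (2 * n + 1) = '2' :: altBits n := by
  rw [altBits]
  have h1 : (1:Int) < 2 * n + 1 := by omega
  have hm : PySem.Int.mod (2 * n + 1) 2 = 1 := by
    rw [PySem.Int.mod_eq_emod_of_pos (by omega)]; omega
  have hd : PySem.Int.floordiv (2 * n + 1) 2 = n := by
    rw [PySem.Int.floordiv_eq_ediv_of_pos (by omega)]; omega
  rw [if_pos h1, hm, hd]; norm_num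

-- one BFS step: the two children of sStr n are sStr (2n+1) and sStr (2n+2)
lemma child_step (n : Int) (hn : 1 ≤ n) :
    (let dl := (sStr n).toList
     let l : Int := PySem.Chars.len dl
     let h := PySem.Int.floordiv l 2
     let pre := PySem.Chars.slice dl none (some h)
     let suf := PySem.Chars.slice dl (some h) none
     (String.ofList (pre ++ ['1', '1'] ++ suf), String.ofList (pre ++ ['2', '2'] ++ suf)))
      = (sStr (2 * n + 1), sStr (2 * n + 2)) := by
  have hb1 : altBits (2 * n + 1 + 1) = '1' :: altBits (n + 1) := by
    have := altBits_double (n := n + 1) (by omega)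
    rw [show 2 * n + 1 + 1 = 2 * (n + 1) by ring, this]
  have hb2 : altBits (2 * n + 2 + 1) = '2' :: altBits (n + 1) := by
    have := altBits_double_succ (n := n + 1) (by omega)
    rw [show 2 * n + 2 + 1 = 2 * (n + 1) + 1 by ring, this]
  set bits := altBits (n + 1) with hbits
  have hdl : (sStr n).toList = bits.reverse ++ bits := by
    simp [sStr, String.toList_ofList, hbits]
  have hlen : ((sStr n).toList).length = 2 * bits.length := by
    simp [hdl]; omega
  have hl : PySem.Chars.len ((sStr n).toList) = ((2 * bits.length : Nat) : Int) := by
    simp [PySem.Chars.len_eq, hlen]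
  have hh : PySem.Int.floordiv ((2 * bits.length : Nat) : Int) 2 = (bits.length : Int) := by
    rw [PySem.Int.floordiv_eq_ediv_of_pos (by omega)]; push_cast; omega
  have hpre : PySem.Chars.slice ((sStr n).toList) none (some (bits.length : Int))
      = bits.reverse := by
    rw [PySem.Chars.slice_eq_listSlice, PySem.List.slice_to_natCast, hdl]
    rw [show bits.length = bits.reverse.length by simp, List.take_left]
  have hsuf : PySem.Chars.slice ((sStr n).toList) (some (bits.length : Int)) none
      = bits := by
    rw [PySem.Chars.slice_eq_listSlice, PySem.List.slice_from_natCast, hdl]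
    rw [show bits.length = bits.reverse.length by simp, List.drop_left]
  simp only [hl, hh, hpre, hsuf, Prod.mk.injEq]
  constructor
  · simp [sStr, hb1]
  · simp [sStr, hb2]

-- loop invariant: after n pops the queue holds sStr (n+1) … sStr (2n+2)
lemma loop_inv (fuel : Nat) : ∀ (n : Nat) (A : Int),
    (n : Int) < A → (A - n).toNat ≤ fuel →
    solveLoop fuel ((List.range' (n + 1) (n + 2)).map (fun (j : Nat) => sStr (j : Int))) (n : Int) A
      = sStr A := by
  induction fuel with
  | zero => intro n A h1 h2; omega
  | succ f ih =>
    intro n A h1 h2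
    have hq : List.range' (n + 1) (n + 2) = (n + 1) :: List.range' (n + 2) (n + 1) :=
      List.range'_succ
    rw [hq]
    simp only [List.map_cons]
    rw [solveLoop]
    by_cases hA : (n : Int) + 1 = A
    · simp only [if_pos hA]
      rw [show A = ((n : Int) + 1) from hA.symm]
      norm_cast
    · simp only [if_neg hA]
      have hc := child_step ((n : Int) + 1) (by omega)
      simp only at hc
      push_cast
      have e1 : String.ofList (PySem.Chars.slice (sStr ((n:Int)+1)).toList none
            (some (PySem.Int.floordiv (PySem.Chars.len (sStr ((n:Int)+1)).toList) 2))
          ++ ['1','1'] ++ PySem.Chars.slice (sStr ((n:Int)+1)).toList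
            (some (PySem.Int.floordiv (PySem.Chars.len (sStr ((n:Int)+1)).toList) 2)) none)
          = sStr (2 * ((n:Int)+1) + 1) := congrArg Prod.fst hc
      have e2 : String.ofList (PySem.Chars.slice (sStr ((n:Int)+1)).toList none
            (some (PySem.Int.floordiv (PySem.Chars.len (sStr ((n:Int)+1)).toList) 2))
          ++ ['2','2'] ++ PySem.Chars.slice (sStr ((n:Int)+1)).toList
            (some (PySem.Int.floordiv (PySem.Chars.len (sStr ((n:Int)+1)).toList) 2)) none)
          = sStr (2 * ((n:Int)+1) + 2) := congrArg Prod.snd hc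
    -- rewrite the two children and the new queue into range' form
      rw [e1, e2]
      have hrange : List.range' (n + 2) (n + 1) ++ [2*n+3, 2*n+4]
          = List.range' (n + 2) (n + 3) := by
        have h := @List.range'_append (n + 2) (n + 1) 2 1
        simp only [one_mul] at h
        rw [show n + 3 = (n + 1) + 2 by omega, ← h]
        congr 1
        rw [show n + 2 + (n + 1) = 2*n+3 by omega]
        rfl
      have hmap : (List.range' (n + 2) (n + 1)).map (fun (j : Nat) => sStr (j : Int))
            ++ [sStr (2 * ((n:Int)+1) + 1), sStr (2 * ((n:Int)+1) + 2)]
          = (List.range' ((n+1) + 1) ((n+1) + 2)).map (fun (j : Nat) => sStr (j : Int)) := by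
        rw [show (n+1) + 1 = n + 2 by omega, show (n+1) + 2 = n + 3 by omega, ← hrange]
        simp only [List.map_append, List.map_cons, List.map_nil]
        congr 2
      rw [hmap]
      have := ih (n + 1) A (by push_cast; omega) (by omega)
      push_cast at this
      exact this

-- ===== VERDICT (by name: the statement is the Claim_ definition above) =====
theorem solve_spec : Claim_equal_solve := by
  intro A _ hpre
  unfold Pre_solve at hpre
  unfold Spec_solve solve
  have h0 : (["11", "22"] : List String)
      = (List.range' (0 + 1) (0 + 2)).map (fun (j : Nat) => sStr (j : Int)) := by
    have b1 : altBits 1 = [] := by rw [altBits]; norm_num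
    have b2 : altBits 2 = ['1'] := by
      rw [altBits, show PySem.Int.mod 2 2 = 0 by decide,
          show PySem.Int.floordiv 2 2 = 1 by decide, b1]; norm_num
    have b3 : altBits 3 = ['2'] := by
      rw [altBits, show PySem.Int.mod 3 2 = 1 by decide,
          show PySem.Int.floordiv 3 2 = 1 by decide, b1]; norm_num
    have e1 : sStr 1 = "11" := by
      show String.ofList _ = _; norm_num [b2]
    have e2 : sStr 2 = "22" := by
      show String.ofList _ = _; norm_num [b3]
    simp [List.range'_succ, e1, e2]
  rw [h0, show (0 : Int) = ((0 : Nat) : Int) by norm_num]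
  rw [loop_inv A.toNat 0 A (by push_cast; omega) (by omega)]
  rfl
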